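-- pv_equiv track=rewrite | github.com/AICSSUPERVISOR/true-asi-system | v21/modules/v19_complete_modules.py | extract_axioms
-- ===== SOURCE A (Python) =====
-- from typing import List, Dict, Tuple, Optional
--
-- def extract_axioms(text: str) -> List[str]:
--     """Extract axioms from text"""
--     axioms = []
--     lines = text.split('\n')
--     in_axioms = False
--
--     for line in lines:
--         if 'Axiom' in line or 'A1.' in line or 'A2.' in line:
--             in_axioms = True
--         if in_axioms and (line.startswith('A') or 'axiom' in line.lower()):
--             axioms.append(line.strip())
--
--     return axioms if axioms else ['A1. Standard axioms of logic']
-- ===== SOURCE B (Python) =====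
-- def extract_axioms(text):
--     """Extract axioms from text: locate the first trigger line, then filter from there."""
--     lines = text.split('\n')
--     for t, line in enumerate(lines):
--         if 'Axiom' in line or 'A1.' in line or 'A2.' in line:
--             axioms = [l.strip() for l in lines[t:]
--                       if l.startswith('A') or 'axiom' in l.lower()]
--             return axioms if axioms else ['A1. Standard axioms of logic']
--     return ['A1. Standard axioms of logic']
-- ===== Notes on version B (the rewrite author's own statement) =====
-- stated objective: alternative
-- what changed: Replaces A's single stateful loop carrying a monotone in_axioms flag with a two-phase locate-then-filter pass: find the index of the first trigger line, then filter/strip the suffix from there.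
import Mathlib
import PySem

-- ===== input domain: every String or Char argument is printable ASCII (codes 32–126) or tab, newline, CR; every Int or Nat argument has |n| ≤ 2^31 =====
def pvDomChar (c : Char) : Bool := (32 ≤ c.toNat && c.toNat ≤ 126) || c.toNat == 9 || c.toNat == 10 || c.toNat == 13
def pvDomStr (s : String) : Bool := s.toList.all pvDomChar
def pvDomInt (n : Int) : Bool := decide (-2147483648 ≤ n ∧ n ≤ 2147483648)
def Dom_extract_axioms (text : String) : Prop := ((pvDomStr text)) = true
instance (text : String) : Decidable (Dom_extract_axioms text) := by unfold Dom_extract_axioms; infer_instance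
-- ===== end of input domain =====

-- B replaces A's single stateful flag-carrying loop with a locate-then-filter two-phase pass (objective: alternative decomposition, same cost).

-- the two line predicates both Pythons share: the trigger test and the collect test
def pvTrig (line : String) : Bool :=
  PySem.Str.isIn "Axiom" line || PySem.Str.isIn "A1." line || PySem.Str.isIn "A2." line
def pvColl (l : String) : Bool :=
  PySem.Str.startswith l "A" || PySem.Str.isIn "axiom" (PySem.Str.lower l)

-- ===== PORT A =====
-- A's loop body: state (axioms, in_axioms), updated exactly as the Python's two ifs do
def pvStepA (st : List String × Bool) (line : String) : List String × Bool :=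
  let inA := if pvTrig line then true else st.2
  let ax := if inA && pvColl line then st.1 ++ [PySem.Str.strip line] else st.1
  (ax, inA)

def extract_axioms (text : String) : List String :=
  let lines := (PySem.Str.split? text "\n").getD []
  let st := lines.foldl pvStepA ([], false)
  if st.1 = [] then ["A1. Standard axioms of logic"] else st.1

-- ===== PORT B =====
-- B: find the first trigger line (Python's enumerate-and-return loop = List.findIdx?), then filter/strip the suffix.
def extract_axioms_alt (text : String) : List String :=
  let lines := (PySem.Str.split? text "\n").getD []
  match lines.findIdx? pvTrig with
  | none => ["A1. Standard axioms of logic"]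
  | some t =>
      let axioms := ((lines.drop t).filter pvColl).map PySem.Str.strip
      if axioms = [] then ["A1. Standard axioms of logic"] else axioms

-- ===== PRECONDITION & SPEC =====
def Spec_extract_axioms (text : String) (out : List String) : Prop := out = extract_axioms_alt text
instance (text : String) (out : List String) : Decidable (Spec_extract_axioms text out) := by unfold Spec_extract_axioms; infer_instance

-- ===== CLAIM (what is proved, stated in full; the proofs are below) =====
def Claim_equal_extract_axioms : Prop := ∀ (text : String), Dom_extract_axioms text → Spec_extract_axioms text (extract_axioms text)

-- ===== LEMMAS AND PROOFS =====

-- once the flag is true, A's loop appends exactly the stripped collect-lines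
lemma pvLoop_true (ls : List String) (ax : List String) :
    ls.foldl pvStepA (ax, true) = (ax ++ (ls.filter pvColl).map PySem.Str.strip, true) := by
  induction ls generalizing ax with
  | nil => simp
  | cons l ls ih =>
      by_cases h : pvColl l = true
      · simp [pvStepA, h, ih]
      · simp [pvStepA, h, ih]

-- A's whole loop from the initial state, characterised by the first trigger index
lemma pvLoop_main (ls : List String) :
    (ls.foldl pvStepA ([], false)).1 =
      (match ls.findIdx? pvTrig with
       | none => ([] : List String)
       | some t => ((ls.drop t).filter pvColl).map PySem.Str.strip) := by
  induction ls with
  | nil => simp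
  | cons l ls ih =>
      by_cases h : pvTrig l = true
      · by_cases hc : pvColl l = true
        · simp [pvStepA, h, hc, pvLoop_true, List.findIdx?_cons]
        · simp [pvStepA, h, hc, pvLoop_true, List.findIdx?_cons]
      · cases hf : ls.findIdx? pvTrig with
        | none =>
            simp only [hf] at ih
            simp [pvStepA, h, hf, ih, List.findIdx?_cons]
        | some t =>
            simp only [hf] at ih
            simp [pvStepA, h, hf, ih, List.findIdx?_cons]

theorem pv_eq (text : String) : extract_axioms text = extract_axioms_alt text := by
  unfold extract_axioms extract_axioms_alt
  simp only [pvLoop_main]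
  cases ((PySem.Str.split? text "\n").getD []).findIdx? pvTrig with
  | none => simp
  | some t => simp

-- ===== VERDICT (by name: the statement is the Claim_ definition above) =====
theorem extract_axioms_spec : Claim_equal_extract_axioms := by
  intro text _
  exact pv_eq text
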